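-- pv_equiv track=rewrite | github.com/Erick-Isra/Modelado | P2/Actividad1.py | existe_solucion
-- ===== SOURCE A (Python) =====
-- def mates_iguales(lista):
--     listas_mates = []
--     lista_iguales = []
--     for sublistas in lista:
--         for elemento in sublistas:
--             if "M" in elemento:
--                 listas_mates.append(int(elemento[:-1]))
--     for i in range(len(listas_mates)):
--         for j in range(i + 1, len(listas_mates)):
--             if listas_mates[i] == listas_mates[j]:
--                 lista_iguales.append(listas_mates[i])
--                 break
--     return lista_iguales
--
-- def existe_solucion(lista):
--     filas_allmate = 0
--     for sublista in lista:
--         contador = 0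
--         for elemento in sublista:
--             if "M" in elemento:
--                 contador += 1
--         if contador == len(sublista):
--             filas_allmate += 1
--     if filas_allmate >1 and len(mates_iguales(lista)) == 0:
--         return False
--     else:
--         return True
-- ===== SOURCE B (Python) =====
-- def existe_solucion(lista):
--     filas_allmate = sum(1 for fila in lista if all("M" in c for c in fila))
--     if filas_allmate <= 1:
--         return True
--     vals = sorted(int(c[:-1]) for fila in lista for c in fila if "M" in c)
--     return any(x == y for x, y in zip(vals, vals[1:]))
-- ===== Notes on version B (the rewrite author's own statement) =====
-- stated objective: faster
-- what changed: B counts all-M rows with all()/sum and replaces A's quadratic pairwise duplicate scan with sort plus adjacent-equality scan, parsing cells only when more than one all-M row exists.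
import Mathlib
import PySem

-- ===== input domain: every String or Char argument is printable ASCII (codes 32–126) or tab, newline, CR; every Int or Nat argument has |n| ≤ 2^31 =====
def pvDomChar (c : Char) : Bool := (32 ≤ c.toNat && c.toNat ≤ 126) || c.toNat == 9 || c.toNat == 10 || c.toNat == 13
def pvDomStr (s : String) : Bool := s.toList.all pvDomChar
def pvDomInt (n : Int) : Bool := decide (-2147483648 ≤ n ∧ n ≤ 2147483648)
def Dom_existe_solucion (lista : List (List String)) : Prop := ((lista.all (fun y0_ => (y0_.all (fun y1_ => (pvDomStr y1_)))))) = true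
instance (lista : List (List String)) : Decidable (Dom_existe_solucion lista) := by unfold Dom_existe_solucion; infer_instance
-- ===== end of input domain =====

-- B replaces A's quadratic pairwise duplicate scan with sort + adjacent-equality scan, and skips parsing entirely when at most one all-M row exists.


-- ===== PORT A =====
-- int(elemento[:-1]) when "M" in elemento, else skipped
def parseCell (e : String) : Option Int :=
  PySem.Int.ofChars? (PySem.Chars.slice e.toList none (some (-1)))

-- the inner 'for elemento in sublistas: if "M" in elemento: listas_mates.append(int(elemento[:-1]))'
def parseRow : List String → Option (List Int)
  | [] => some []
  | e :: es =>
    if PySem.Str.isIn "M" e then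
      (parseCell e).bind (fun v => (parseRow es).map (fun vs => v :: vs))
    else parseRow es

-- 'for sublistas in lista: …' collecting listas_mates row by row
def parseMates : List (List String) → Option (List Int)
  | [] => some []
  | sub :: rest => (parseRow sub).bind (fun xs => (parseMates rest).map (fun ys => xs ++ ys))

-- inner 'for j in range(i+1, len): if listas_mates[i] == listas_mates[j]: append; break'
def innerHasEq (x : Int) : List Int → Bool
  | [] => false
  | y :: ys => if x = y then true else innerHasEq x ys

-- outer 'for i in range(len(listas_mates)): …' building lista_iguales in i order
def igualesAux : List Int → List Int
  | [] => []
  | x :: rest => if innerHasEq x rest then x :: igualesAux rest else igualesAux rest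

def mates_iguales (lista : List (List String)) : Option (List Int) :=
  (parseMates lista).map igualesAux

-- 'contador' loop of a row
def contadorRow (sub : List String) : Int :=
  sub.foldl (fun c e => if PySem.Str.isIn "M" e then c + 1 else c) 0

def existe_solucion (lista : List (List String)) : Bool :=
  let filas_allmate : Int :=
    lista.foldl (fun f sub => if contadorRow sub = (sub.length : Int) then f + 1 else f) 0
  if 1 < filas_allmate then
    match mates_iguales lista with
    | none => true          -- Python raises ValueError here; excluded by Pre_
    | some li => if li.length = 0 then false else true
  else true

-- ===== PORT B =====
def allMRow (fila : List String) : Bool := fila.all (fun c => PySem.Str.isIn "M" c)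

-- single pass over the flattened cells collecting the parsed M-values
def collectVals : List String → Option (List Int)
  | [] => some []
  | c :: cs =>
    if PySem.Str.isIn "M" c then
      (parseCell c).bind (fun v => (collectVals cs).map (fun vs => v :: vs))
    else collectVals cs

-- any(x == y for x, y in zip(vals, vals[1:]))
def hasAdjDup : List Int → Bool
  | [] => false
  | [_] => false
  | x :: y :: rest => x == y || hasAdjDup (y :: rest)

def existe_solucion_alt (lista : List (List String)) : Bool :=
  let filas_allmate : Int := (lista.countP allMRow : Int)
  if filas_allmate ≤ 1 then true
  else
    match collectVals lista.flatten with
    | none => true          -- same ValueError inputs; excluded by Pre_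
    | some vals => hasAdjDup (PySem.List.sorted vals (fun v => v) false)

-- ===== PRECONDITION & SPEC =====
-- Pre_ excludes exactly the inputs where A raises ValueError: more than one all-M row and some
-- M-cell whose text without its last character is not a valid int literal (B raises there too).
def Pre_existe_solucion (lista : List (List String)) : Prop :=
  1 < lista.countP (fun sub => sub.all (fun c => PySem.Str.isIn "M" c)) →
    ∀ sub ∈ lista, ∀ e ∈ sub, PySem.Str.isIn "M" e = true → (parseCell e).isSome
instance (lista : List (List String)) : Decidable (Pre_existe_solucion lista) := by
  unfold Pre_existe_solucion; infer_instance

def pvWitness_existe_solucion : List (List String) := [["3M"], ["5M", "3M"]]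

def Spec_existe_solucion (lista : List (List String)) (out : Bool) : Prop := out = existe_solucion_alt lista
instance (lista : List (List String)) (out : Bool) : Decidable (Spec_existe_solucion lista out) := by unfold Spec_existe_solucion; infer_instance

-- ===== CLAIM (what is proved, stated in full; the proofs are below) =====
def Claim_equal_existe_solucion : Prop := ∀ (lista : List (List String)), Dom_existe_solucion lista → Pre_existe_solucion lista → Spec_existe_solucion lista (existe_solucion lista)

-- ===== LEMMAS AND PROOFS =====

-- A's per-row counter reaches the row length iff every cell contains "M"
theorem contadorRow_eq_length_iff (sub : List String) :
    (contadorRow sub = (sub.length : Int)) ↔ allMRow sub = true := by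
  unfold contadorRow
  rw [PySem.List.foldl_count_if (fun e => PySem.Str.isIn "M" e) sub 0, zero_add]
  rw [Int.natCast_inj]
  rw [List.countP_eq_length]
  simp [allMRow, List.all_eq_true]

-- A's outer counting loop is countP
theorem foldl_count_allM (lista : List (List String)) :
    lista.foldl (fun f sub => if contadorRow sub = (sub.length : Int) then f + 1 else f) 0
      = (lista.countP allMRow : Int) := by
  have hfun : (fun (f : Int) sub => if contadorRow sub = (sub.length : Int) then f + 1 else f)
      = (fun f sub => if (decide (contadorRow sub = (sub.length : Int))) = true then f + 1 else f) := by
    funext f sub; simp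
  rw [hfun, PySem.List.foldl_count_if (fun sub => decide (contadorRow sub = (sub.length : Int))) lista 0,
    zero_add]
  congr 1
  apply List.countP_congr
  intro sub _
  simp [contadorRow_eq_length_iff sub]

-- collectVals distributes over append
theorem collectVals_append (xs ys : List String) :
    collectVals (xs ++ ys)
      = (collectVals xs).bind (fun a => (collectVals ys).map (fun b => a ++ b)) := by
  induction xs with
  | nil => cases h : collectVals ys <;> simp [collectVals, h]
  | cons c cs ih =>
    simp only [List.cons_append, collectVals, ih]
    split_ifs
    · cases parseCell c <;> cases collectVals cs <;> cases collectVals ys <;> rfl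
    · rfl

-- parseRow is collectVals on one row
theorem parseRow_eq_collectVals (sub : List String) : parseRow sub = collectVals sub := by
  induction sub with
  | nil => rfl
  | cons c cs ih => simp only [parseRow, collectVals, ih]

-- A's row-by-row collection equals B's collection over the flattened list
theorem parseMates_eq_collectVals (lista : List (List String)) :
    parseMates lista = collectVals lista.flatten := by
  induction lista with
  | nil => rfl
  | cons sub rest ih =>
    simp only [parseMates, List.flatten_cons, collectVals_append, ih,
      parseRow_eq_collectVals]

-- the inner scan is membership
theorem innerHasEq_eq_contains (x : Int) (l : List Int) :
    innerHasEq x l = l.contains x := by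
  induction l with
  | nil => rfl
  | cons y ys ih =>
    simp only [innerHasEq, ih, List.contains_cons]
    by_cases h : x = y <;> simp [h, beq_iff_eq]

-- A's duplicate list is empty iff the values are nodup
theorem igualesAux_eq_nil_iff (l : List Int) : igualesAux l = [] ↔ l.Nodup := by
  induction l with
  | nil => simp [igualesAux]
  | cons x rest ih =>
    simp only [igualesAux, innerHasEq_eq_contains, List.nodup_cons]
    by_cases h : rest.contains x
    · simp only [h, if_pos]
      simp only [List.contains_eq_mem, decide_eq_true_eq] at h
      simp [h]
    · rw [if_neg h, ih]
      simp only [List.contains_eq_mem, decide_eq_true_eq] at h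
      simp [h]

-- B's adjacent scan is false iff no two neighbours are equal
theorem hasAdjDup_eq_false_iff (l : List Int) :
    hasAdjDup l = false ↔ l.IsChain (fun a b => a ≠ b) := by
  induction l with
  | nil => simp [hasAdjDup]
  | cons x rest ih =>
    cases rest with
    | nil => simp [hasAdjDup]
    | cons y ys =>
      simp only [hasAdjDup, Bool.or_eq_false_iff, ih, List.isChain_cons_cons,
        beq_eq_false_iff_ne]

-- on a ≤-sorted list, no adjacent equal pair means nodup
theorem nodup_of_sorted_chain_ne (l : List Int)
    (hs : l.Pairwise (fun a b => a ≤ b)) (hc : l.IsChain (fun a b => a ≠ b)) : l.Nodup := by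
  have hlt : l.IsChain (fun a b => a < b) := by
    have h1 : l.IsChain (fun a b => a ≤ b) := List.isChain_iff_pairwise.mpr hs
    clear hs
    induction l with
    | nil => simp
    | cons x rest ih =>
      cases rest with
      | nil => simp
      | cons y ys =>
        rw [List.isChain_cons_cons] at *
        exact ⟨lt_of_le_of_ne h1.1 hc.1, ih hc.2 h1.2⟩
  exact (List.isChain_iff_pairwise.mp hlt).nodup

-- the core: B's sort+scan decides exactly A's "lista_iguales nonempty"
theorem hasAdjDup_sorted_eq (vals : List Int) :
    hasAdjDup (PySem.List.sorted vals (fun v => v) false) = !decide vals.Nodup := by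
  have hperm : (PySem.List.sorted vals (fun v => v) false).Perm vals :=
    PySem.List.sorted_perm vals (fun v => v) false
  have hnd : (PySem.List.sorted vals (fun v => v) false).Nodup ↔ vals.Nodup :=
    hperm.nodup_iff
  by_cases h : vals.Nodup
  · have hfalse : hasAdjDup (PySem.List.sorted vals (fun v => v) false) = false := by
      rw [hasAdjDup_eq_false_iff]
      exact (hnd.mpr h).isChain
    simp [hfalse, h]
  · have hne : hasAdjDup (PySem.List.sorted vals (fun v => v) false) ≠ false := by
      intro hc
      exact h (hnd.mp (nodup_of_sorted_chain_ne _
        (PySem.List.sorted_pairwise vals (fun v => v))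
        ((hasAdjDup_eq_false_iff _).mp hc)))
    cases hX : hasAdjDup (PySem.List.sorted vals (fun v => v) false) with
    | false => exact absurd hX hne
    | true => simp [h]

-- Pre_ makes the shared parse succeed
theorem collectVals_isSome (lista : List (List String))
    (h : ∀ sub ∈ lista, ∀ e ∈ sub, PySem.Str.isIn "M" e = true → (parseCell e).isSome) :
    (collectVals lista.flatten).isSome := by
  have : ∀ cs : List String, (∀ e ∈ cs, PySem.Str.isIn "M" e = true → (parseCell e).isSome) →
      (collectVals cs).isSome := by
    intro cs hcs
    induction cs with
    | nil => simp [collectVals]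
    | cons c r ih =>
      simp only [collectVals]
      split_ifs with hM
      · have h1 := hcs c (by simp) hM
        cases hp : parseCell c with
        | none => rw [hp] at h1; simp at h1
        | some v =>
          have h2 := ih (fun e he hm => hcs e (by simp [he]) hm)
          cases hr : collectVals r with
          | none => rw [hr] at h2; simp at h2
          | some vs => simp
      · exact ih (fun e he hm => hcs e (by simp [he]) hm)
  refine this _ ?_
  intro e he hm
  rw [List.mem_flatten] at he
  obtain ⟨sub, hsub, hes⟩ := he
  exact h sub hsub e hes hm

-- ===== VERDICT (by name: the statement is the Claim_ definition above) =====
theorem existe_solucion_spec : Claim_equal_existe_solucion := by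
  intro lista _ hpre
  unfold Spec_existe_solucion existe_solucion existe_solucion_alt
  rw [foldl_count_allM]
  by_cases hcnt : 1 < lista.countP allMRow
  · have hle : ¬ (lista.countP allMRow ≤ 1) := by omega
    have hsome := collectVals_isSome lista (hpre hcnt)
    unfold mates_iguales
    rw [parseMates_eq_collectVals]
    cases hv : collectVals lista.flatten with
    | none => rw [hv] at hsome; simp at hsome
    | some vals =>
      simp only [Option.map_some]
      rw [hasAdjDup_sorted_eq]
      by_cases hnd : vals.Nodup
      · have : igualesAux vals = [] := (igualesAux_eq_nil_iff vals).mpr hnd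
        simp [this, hnd, hcnt, hle]
      · have : igualesAux vals ≠ [] := fun hc => hnd ((igualesAux_eq_nil_iff vals).mp hc)
        simp [List.length_eq_zero_iff, this, hnd, hcnt, hle]
  · have hle : lista.countP allMRow ≤ 1 := by omega
    simp [hcnt, hle]
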